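-- pv_equiv track=rewrite | github.com/vonvic/Advent-Of-Code-2022-Python | 08/problem.py | find_all_visible_from_right
-- ===== SOURCE A (Python) =====
-- def find_all_visible_from_right(mat: list[list[int]]) -> set[tuple[int, int]]:
--     visible: set[tuple[int, int]] = set()
--
--     n = len(mat)
--     m = len(mat[0])
--
--     for i in range(n):
--         cur_max = -1
--         for j in range(m-1,-1, -1):
--             cur_val = mat[i][j]
--             if cur_val > cur_max:
--                 cur_max = cur_val
--                 visible.add((i, j))
--
--     return visible
-- ===== SOURCE B (Python) =====
-- def _suffix_max(row):
--     # suff[j] = max of row[j+1:], seeded with -1 for the last column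
--     suff = [-1] * len(row)
--     for j in range(len(row) - 2, -1, -1):
--         suff[j] = max(row[j + 1], suff[j + 1])
--     return suff
--
--
-- def find_all_visible_from_right(mat):
--     m = len(mat[0])
--     visible = set()
--     for i in range(len(mat)):
--         row = mat[i][:m]
--         suff = _suffix_max(row)
--         for j in reversed(range(m)):
--             if row[j] > suff[j]:
--                 visible.add((i, j))
--     return visible
-- ===== Notes on version B (the rewrite author's own statement) =====
-- stated objective: alternative
-- what changed: Each row is processed in two separate passes - a right-to-left sweep that builds a suffix-maximum table seeded with -1, then a pass that marks cell (i,j) visible when mat[i][j] exceeds the table entry - instead of A's single fused scan carrying a running maximum.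
import Mathlib
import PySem

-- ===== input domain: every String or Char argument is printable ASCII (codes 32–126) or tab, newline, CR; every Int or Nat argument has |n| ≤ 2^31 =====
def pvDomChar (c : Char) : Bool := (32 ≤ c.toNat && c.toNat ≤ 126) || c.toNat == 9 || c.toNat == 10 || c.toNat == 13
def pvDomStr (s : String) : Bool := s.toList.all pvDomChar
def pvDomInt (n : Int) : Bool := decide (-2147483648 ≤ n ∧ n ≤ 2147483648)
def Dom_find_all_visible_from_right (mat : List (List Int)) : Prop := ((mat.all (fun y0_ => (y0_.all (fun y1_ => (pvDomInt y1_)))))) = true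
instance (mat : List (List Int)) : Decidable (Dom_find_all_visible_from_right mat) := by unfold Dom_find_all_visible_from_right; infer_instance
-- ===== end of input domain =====

-- B separates each row's work into two passes — build a suffix-maximum table, then test
-- each cell against it — instead of A's fused running-max scan (objective: alternative).

-- ===== PORT A =====
-- inner loop 'for j in range(m-1,-1,-1)': argument k = j+1 = iterations remaining
def pvRowA (i : Nat) (mat : List (List Int)) : Nat → Int → PySem.Set (Int × Int) → PySem.Set (Int × Int)
  | 0, _, vis => vis
  | k+1, curMax, vis =>
    let curVal := (mat.getD i []).getD k 0
    if curVal > curMax then pvRowA i mat k curVal (PySem.Set.add vis ((i : Int), (k : Int)))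
    else pvRowA i mat k curMax vis

def find_all_visible_from_right (mat : List (List Int)) : List (Int × Int) :=
  let n := mat.length
  let m := (mat.headD []).length
  (List.range n).foldl (fun vis i => pvRowA i mat m (-1) vis) PySem.Set.empty

-- ===== PORT B =====
-- _suffix_max: the right-to-left array fill becomes building the list from the right
def pvSuffixMax : List Int → List Int
  | [] => []
  | [_] => [-1]
  | _ :: b :: t =>
      let s := pvSuffixMax (b :: t)
      (max b (s.headD (-1))) :: s

-- second pass 'for j in reversed(range(m))': argument k = j+1 = iterations remaining
def pvRowB (i : Nat) (row suff : List Int) : Nat → PySem.Set (Int × Int) → PySem.Set (Int × Int)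
  | 0, vis => vis
  | k+1, vis =>
      let vis' := if row.getD k 0 > suff.getD k 0 then PySem.Set.add vis ((i : Int), (k : Int)) else vis
      pvRowB i row suff k vis'

def find_all_visible_from_right_alt (mat : List (List Int)) : List (Int × Int) :=
  let m := (mat.headD []).length
  (List.range mat.length).foldl (fun vis i =>
      let row := (mat.getD i []).take m
      pvRowB i row (pvSuffixMax row) m vis) PySem.Set.empty

-- ===== PRECONDITION & SPEC =====
-- Pre_ excludes exactly the inputs where A raises IndexError: the empty matrix (mat[0])
-- and matrices with a row shorter than the first row (mat[i][j] for j < len(mat[0])).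
def Pre_find_all_visible_from_right (mat : List (List Int)) : Prop :=
  mat ≠ [] ∧ ∀ row ∈ mat, (mat.headD []).length ≤ row.length
instance (mat : List (List Int)) : Decidable (Pre_find_all_visible_from_right mat) := by
  unfold Pre_find_all_visible_from_right; infer_instance
def pvWitness_find_all_visible_from_right : List (List Int) := [[1, 2], [3, 0]]

def Spec_find_all_visible_from_right (mat : List (List Int)) (out : List (Int × Int)) : Prop := out = find_all_visible_from_right_alt mat
instance (mat : List (List Int)) (out : List (Int × Int)) : Decidable (Spec_find_all_visible_from_right mat out) := by unfold Spec_find_all_visible_from_right; infer_instance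

-- ===== CLAIM (what is proved, stated in full; the proofs are below) =====
def Claim_equal_find_all_visible_from_right : Prop := ∀ (mat : List (List Int)), Dom_find_all_visible_from_right mat → Pre_find_all_visible_from_right mat → Spec_find_all_visible_from_right mat (find_all_visible_from_right mat)

-- ===== LEMMAS AND PROOFS =====

-- max of a suffix, seeded with -1 (what A's cur_max holds and what _suffix_max stores)
def pvSfx (l : List Int) : Int := l.foldr max (-1)

theorem pvSuffixMax_length (l : List Int) : (pvSuffixMax l).length = l.length := by
  induction l with
  | nil => rfl
  | cons a t ih =>
    cases t with
    | nil => rfl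
    | cons b u => simp [pvSuffixMax] at ih ⊢; omega

theorem pvSuffixMax_getD (l : List Int) (k : Nat) (hk : k < l.length) :
    (pvSuffixMax l).getD k 0 = pvSfx (l.drop (k + 1)) := by
  induction l generalizing k with
  | nil => simp at hk
  | cons a t ih =>
    cases t with
    | nil =>
      cases k with
      | zero => simp [pvSuffixMax, pvSfx]
      | succ k => simp at hk
    | cons b u =>
      cases k with
      | zero =>
        have h0 : 0 < (b :: u).length := by simp
        have := ih 0 h0
        have hne : pvSuffixMax (b :: u) ≠ [] := by
          intro h; have := pvSuffixMax_length (b :: u); rw [h] at this; simp at this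
        obtain ⟨c, s, hcs⟩ := List.exists_cons_of_ne_nil hne
        simp [pvSuffixMax, hcs] at this ⊢
        simp [pvSfx] at this ⊢
        omega
      | succ k =>
        have hk' : k < (b :: u).length := by simp at hk ⊢; omega
        have := ih k hk'
        simp [pvSuffixMax]
        simpa using this

theorem pvRow_eq (i : Nat) (mat : List (List Int)) (m : Nat)
    (hm : m ≤ (mat.getD i []).length) :
    ∀ k, k ≤ m → ∀ vis,
      pvRowA i mat k (pvSfx (((mat.getD i []).take m).drop k)) vis
        = pvRowB i ((mat.getD i []).take m) (pvSuffixMax ((mat.getD i []).take m)) k vis := by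
  have hlen : ((mat.getD i []).take m).length = m := by
    rw [List.length_take]; omega
  intro k
  induction k with
  | zero => intro _ vis; rfl
  | succ k ih =>
    intro hkm vis
    have hk : k < ((mat.getD i []).take m).length := by omega
    have hkl : k < (mat.getD i []).length := by omega
    have hget : (mat.getD i []).getD k 0 = ((mat.getD i []).take m).getD k 0 := by
      rw [List.getD_eq_getElem _ 0 hkl, List.getD_eq_getElem _ 0 hk, List.getElem_take]
    have hsuf : (pvSuffixMax ((mat.getD i []).take m)).getD k 0
        = pvSfx (((mat.getD i []).take m).drop (k + 1)) := pvSuffixMax_getD _ k hk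
    have hdrop : ((mat.getD i []).take m).drop k
        = ((mat.getD i []).take m).getD k 0 :: ((mat.getD i []).take m).drop (k + 1) := by
      have hg : ((mat.getD i []).take m).getD k 0 = ((mat.getD i []).take m)[k] :=
        List.getD_eq_getElem _ 0 hk
      rw [hg]
      exact List.drop_eq_getElem_cons hk
    have hsfx : pvSfx (((mat.getD i []).take m).drop k)
        = max (((mat.getD i []).take m).getD k 0) (pvSfx (((mat.getD i []).take m).drop (k + 1))) := by
      rw [hdrop]; rfl
    simp only [pvRowA, pvRowB, hget, hsuf]
    by_cases hgt : ((mat.getD i []).take m).getD k 0 > pvSfx (((mat.getD i []).take m).drop (k + 1))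
    · rw [if_pos hgt, if_pos hgt]
      have : ((mat.getD i []).take m).getD k 0 = pvSfx (((mat.getD i []).take m).drop k) := by
        rw [hsfx]; omega
      rw [this]
      exact ih (by omega) _
    · rw [if_neg hgt, if_neg hgt]
      have : pvSfx (((mat.getD i []).take m).drop (k + 1)) = pvSfx (((mat.getD i []).take m).drop k) := by
        rw [hsfx]; omega
      rw [this]
      exact ih (by omega) _

-- ===== VERDICT (by name: the statement is the Claim_ definition above) =====
theorem find_all_visible_from_right_spec : Claim_equal_find_all_visible_from_right := by
  intro mat _ hpre
  unfold Spec_find_all_visible_from_right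
  unfold find_all_visible_from_right find_all_visible_from_right_alt
  simp only []
  refine PySem.List.foldl_congr_mem _ _ _ _ ?_
  intro vis i hi
  have hi' : i < mat.length := by simpa using List.mem_range.mp hi
  have hm : (mat.headD []).length ≤ (mat.getD i []).length := by
    apply hpre.2
    rw [List.getD_eq_getElem?_getD, List.getElem?_eq_getElem hi']
    exact List.getElem_mem hi'
  have hrow := pvRow_eq i mat (mat.headD []).length hm (mat.headD []).length (le_refl _) vis
  have hdrop : (((mat.getD i []).take (mat.headD []).length).drop (mat.headD []).length) = [] := by
    apply List.drop_eq_nil_of_le; simp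
  rw [hdrop] at hrow
  exact hrow
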